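-- pv_equiv track=rewrite | github.com/QYbPtqyb/ICEPRE | ICEPRE.py | merge_trace
-- ===== SOURCE A (Python) =====
-- def merge_trace(inferred_boundary, offset_set):
--     field_sum = inferred_boundary.count(True) + 1
--     field_id = 0
--     filed_trace = {}
--     for i in range(len(inferred_boundary) + 1):
--
--         # for key, trace_set in offset_set.item():
--         if i in offset_set:
--             if field_id in filed_trace:
--                 filed_trace[field_id] = filed_trace[field_id].union(offset_set[i])
--             else:
--                 filed_trace[field_id] = offset_set[i]
--
--         if i == len(inferred_boundary):
--             break
--
--         if i <= len(inferred_boundary) and inferred_boundary[i]: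
--             field_id += 1
--     return filed_trace
-- ===== SOURCE B (Python) =====
-- def merge_trace(inferred_boundary, offset_set):
--     prefix = [0]
--     acc = 0
--     for b in inferred_boundary:
--         acc = acc + (1 if b else 0)
--         prefix.append(acc)
--     filed_trace = {}
--     for i in sorted(offset_set):
--         if 0 <= i < len(prefix):
--             field_id = prefix[i]
--             if field_id in filed_trace:
--                 filed_trace[field_id] = filed_trace[field_id].union(offset_set[i])
--             else:
--                 filed_trace[field_id] = offset_set[i]
--     return filed_trace
-- ===== Notes on version B (the rewrite author's own statement) =====
-- stated objective: alternative
-- what changed: Instead of scanning every index 0..len(inferred_boundary) with a running field counter and a break, B precomputes a prefix array of boundary counts in one pass and then visits only the dict's keys in ascending sorted order, reading each key's field id straight from the prefix array.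
import Mathlib
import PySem

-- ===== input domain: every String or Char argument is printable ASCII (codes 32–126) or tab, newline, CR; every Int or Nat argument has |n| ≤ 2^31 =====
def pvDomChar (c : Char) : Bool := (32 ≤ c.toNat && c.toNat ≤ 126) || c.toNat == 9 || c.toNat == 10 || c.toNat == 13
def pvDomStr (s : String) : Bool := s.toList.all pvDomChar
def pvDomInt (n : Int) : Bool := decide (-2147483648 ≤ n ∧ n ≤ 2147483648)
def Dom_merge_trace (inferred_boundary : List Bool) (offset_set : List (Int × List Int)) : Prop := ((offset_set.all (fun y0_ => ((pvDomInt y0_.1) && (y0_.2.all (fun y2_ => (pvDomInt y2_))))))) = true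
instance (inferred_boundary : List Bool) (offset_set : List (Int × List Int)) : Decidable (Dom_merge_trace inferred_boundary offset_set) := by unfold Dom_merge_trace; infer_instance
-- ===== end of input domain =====

-- B replaces A's dense scan over every index 0..len with a sparse pass over the dict's keys in
-- ascending order, computing each key's field id directly from the boundary prefix (objective: simpler).

-- ===== PORT A =====
def merge_trace (inferred_boundary : List Bool) (offset_set : List (Int × List Int)) : List (Int × List Int) :=
  let n : Int := inferred_boundary.length
  let d : PySem.Dict Int (List Int) := PySem.Dict.mk offset_set
  let _field_sum : Int := (PySem.List.count inferred_boundary true : Int) + 1   -- unused in Python too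
  -- for i in range(len(inferred_boundary)+1): …
  (((PySem.List.pyRange 0 (n + 1) 1).foldl
      (fun (st : Int × PySem.Dict Int (List Int)) (i : Int) =>
        let tr :=
          if d.contains i then
            if st.2.contains st.1 then
              st.2.insert st.1 (PySem.Set.union (st.2.getD st.1 []) (d.getD i []))
            else
              st.2.insert st.1 (d.getD i [])
          else st.2
        if i = n then (st.1, tr)          -- 'break' (this is the last iteration)
        else if i ≤ n ∧ PySem.List.pyGetD inferred_boundary i false then (st.1 + 1, tr)
        else (st.1, tr))
      (0, PySem.Dict.empty)).2).items

-- ===== PORT B =====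
def merge_trace_alt (inferred_boundary : List Bool) (offset_set : List (Int × List Int)) : List (Int × List Int) :=
  let d : PySem.Dict Int (List Int) := PySem.Dict.mk offset_set
  -- prefix = [0]; acc = 0; for b in inferred_boundary: acc = acc + (1 if b else 0); prefix.append(acc)
  let ap : Int × List Int :=
    inferred_boundary.foldl
      (fun (st : Int × List Int) bv =>
        (st.1 + (if bv then 1 else 0), st.2 ++ [st.1 + (if bv then 1 else 0)]))
      (0, [0])
  let pfx : List Int := ap.2
  -- for i in sorted(offset_set): …
  ((PySem.List.sorted (PySem.Set.ofList (offset_set.map Prod.fst)) (fun x => x) false).foldl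
      (fun (tr : PySem.Dict Int (List Int)) (i : Int) =>
        if 0 ≤ i ∧ i < (pfx.length : Int) then
          let fid : Int := PySem.List.pyGetD pfx i 0   -- prefix[i]; in range under the guard
          if tr.contains fid then
            tr.insert fid (PySem.Set.union (tr.getD fid []) (d.getD i []))
          else
            tr.insert fid (d.getD i [])
        else tr)
      PySem.Dict.empty).items

-- ===== PRECONDITION & SPEC =====
def Spec_merge_trace (inferred_boundary : List Bool) (offset_set : List (Int × List Int)) (out : List (Int × List Int)) : Prop := out = merge_trace_alt inferred_boundary offset_set
instance (inferred_boundary : List Bool) (offset_set : List (Int × List Int)) (out : List (Int × List Int)) : Decidable (Spec_merge_trace inferred_boundary offset_set out) := by unfold Spec_merge_trace; infer_instance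

-- ===== CLAIM (what is proved, stated in full; the proofs are below) =====
def Claim_equal_merge_trace : Prop := ∀ (inferred_boundary : List Bool) (offset_set : List (Int × List Int)), Dom_merge_trace inferred_boundary offset_set → Spec_merge_trace inferred_boundary offset_set (merge_trace inferred_boundary offset_set)

-- ===== LEMMAS AND PROOFS =====

-- number of True boundaries strictly before index i (the field id A's counter holds at index i)
def pvCnt (b : List Bool) (i : Int) : Int := (PySem.List.count (b.take i.toNat) true : Int)

-- the common merge step both programs perform for a present key i with field id fid
def pvMerge (d : PySem.Dict Int (List Int)) (tr : PySem.Dict Int (List Int)) (fid i : Int) : PySem.Dict Int (List Int) :=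
  if tr.contains fid then
    tr.insert fid (PySem.Set.union (tr.getD fid []) (d.getD i []))
  else
    tr.insert fid (d.getD i [])

lemma pvFoldl_guard_filter {α β : Type} (p : β → Prop) [DecidablePred p]
    (g : α → β → α) (l : List β) (s : α) :
    l.foldl (fun s x => if p x then g s x else s) s
      = (l.filter (fun x => decide (p x))).foldl g s := by
  induction l generalizing s with
  | nil => rfl
  | cons x xs ih =>
    simp only [List.foldl_cons, List.filter_cons]
    by_cases h : p x <;> simp [h, ih]

lemma pvCnt_succ (b : List Bool) (a : Int) (h0 : 0 ≤ a) (h1 : a < (b.length : Int)) :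
    pvCnt b (a + 1) = pvCnt b a + (if PySem.List.pyGetD b a false then 1 else 0) := by
  obtain ⟨k, rfl⟩ : ∃ k : Nat, a = (k : Int) := ⟨a.toNat, (Int.toNat_of_nonneg h0).symm⟩
  have hk : k < b.length := by exact_mod_cast h1
  unfold pvCnt
  have h2 : ((k : Int) + 1).toNat = k + 1 := by omega
  rw [h2, Int.toNat_natCast, List.take_add_one]
  by_cases hb : b[k] = true <;>
    simp [PySem.List.pyGetD_natCast, List.getD_eq_getElem?_getD, List.getElem?_eq_getElem hk, hb,
      PySem.List.count, List.count_append]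

-- A's fold with running counter equals a fold where the field id is recomputed from the prefix
lemma pvA_fold (b : List Bool) (os : List (Int × List Int)) (k : Nat) :
    ∀ (a : Int) (tr : PySem.Dict Int (List Int)),
    0 ≤ a → ((b.length : Int) + 1 - a).toNat = k →
    ((PySem.List.pyRange a ((b.length : Int) + 1) 1).foldl
        (fun (st : Int × PySem.Dict Int (List Int)) (i : Int) =>
          let tr' :=
            if (PySem.Dict.mk os).contains i then
              if st.2.contains st.1 then
                st.2.insert st.1 (PySem.Set.union (st.2.getD st.1 []) ((PySem.Dict.mk os).getD i []))
              else
                st.2.insert st.1 ((PySem.Dict.mk os).getD i [])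
            else st.2
          if i = (b.length : Int) then (st.1, tr')
          else if i ≤ (b.length : Int) ∧ PySem.List.pyGetD b i false then (st.1 + 1, tr')
          else (st.1, tr'))
        (pvCnt b a, tr)).2
      = (PySem.List.pyRange a ((b.length : Int) + 1) 1).foldl
          (fun tr i =>
            if (PySem.Dict.mk os).contains i then pvMerge (PySem.Dict.mk os) tr (pvCnt b i) i else tr)
          tr := by
  induction k with
  | zero =>
    intro a tr h0 hk
    rw [PySem.List.pyRange_one_eq_nil (by omega)]
    rfl
  | succ k ih =>
    intro a tr h0 hk
    set n : Int := (b.length : Int) with hn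
    have ha : a < n + 1 := by omega
    rw [PySem.List.pyRange_one_cons ha]
    simp only [List.foldl_cons]
    by_cases hend : a = n
    · -- last iteration: the counter branch is the 'break'; the remaining range is empty
      subst hend
      rw [PySem.List.pyRange_one_eq_nil (by omega)]
      simp [pvMerge]
    · have halt : a < n := by omega
      have hstep : pvCnt b a + (if PySem.List.pyGetD b a false then 1 else 0) = pvCnt b (a + 1) :=
        (pvCnt_succ b a h0 halt).symm
      by_cases hmem : (PySem.Dict.mk os).contains a = true
      · by_cases hgd : PySem.List.pyGetD b a false = true
        · have : pvCnt b a + 1 = pvCnt b (a + 1) := by rw [← hstep, hgd]; simp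
          simpa [hend, hmem, hgd, pvMerge, le_of_lt halt, this]
            using ih (a + 1) _ (by omega) (by omega)
        · have : pvCnt b a = pvCnt b (a + 1) := by rw [← hstep]; simp [hgd]
          simpa [hend, hmem, hgd, pvMerge, le_of_lt halt, ← this]
            using ih (a + 1) _ (by omega) (by omega)
      · by_cases hgd : PySem.List.pyGetD b a false = true
        · have : pvCnt b a + 1 = pvCnt b (a + 1) := by rw [← hstep, hgd]; simp
          simpa [hend, hmem, hgd, le_of_lt halt, this]
            using ih (a + 1) _ (by omega) (by omega)
        · have : pvCnt b a = pvCnt b (a + 1) := by rw [← hstep]; simp [hgd]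
          simpa [hend, hmem, hgd, le_of_lt halt, ← this]
            using ih (a + 1) _ (by omega) (by omega)

-- the prefix loop of B computes, at position k, the number of True boundaries before index k
lemma pvPrefix_go (full : List Bool) :
    ∀ (b c : List Bool), full = c ++ b →
    (b.foldl
        (fun (st : Int × List Int) bv =>
          (st.1 + (if bv then 1 else 0), st.2 ++ [st.1 + (if bv then 1 else 0)]))
        ((PySem.List.count c true : Int), (List.range (c.length + 1)).map (fun k : Nat => pvCnt full (k : Int))))
      = ((PySem.List.count full true : Int),
          (List.range (full.length + 1)).map (fun k : Nat => pvCnt full (k : Int))) := by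
  intro b
  induction b with
  | nil =>
    intro c h
    simp only [List.append_nil] at h
    subst h
    rfl
  | cons x bs ih =>
    intro c h
    simp only [List.foldl_cons]
    have hcnt : (PySem.List.count c true : Int) + (if x then 1 else 0)
        = (PySem.List.count (c ++ [x]) true : Int) := by
      by_cases hx : x = true <;> simp [hx, PySem.List.count, List.count_append]
    have htake : full.take (c.length + 1) = c ++ [x] := by
      subst h
      rw [List.take_append]
      simp
    have hlast : pvCnt full ((c.length : Int) + 1) = (PySem.List.count (c ++ [x]) true : Int) := by
      unfold pvCnt
      rw [show ((c.length : Int) + 1).toNat = c.length + 1 by omega, htake]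
    have hmap2 : (List.range (c.length + 1)).map (fun k : Nat => pvCnt full (k : Int))
          ++ [(PySem.List.count (c ++ [x]) true : Int)]
        = (List.range ((c ++ [x]).length + 1)).map (fun k : Nat => pvCnt full (k : Int)) := by
      have h2 : pvCnt full (((c.length + 1 : Nat)) : Int)
          = (PySem.List.count (c ++ [x]) true : Int) := by push_cast; exact hlast
      rw [show (c ++ [x]).length + 1 = (c.length + 1) + 1 by simp]
      conv_rhs => rw [List.range_succ]
      rw [List.map_append, List.map_singleton, h2]
    rw [hcnt, hmap2]
    exact ih (c ++ [x]) (by simpa [List.append_assoc] using h)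

lemma pvPrefix (b : List Bool) :
    (b.foldl
        (fun (st : Int × List Int) bv =>
          (st.1 + (if bv then 1 else 0), st.2 ++ [st.1 + (if bv then 1 else 0)]))
        (0, [0])).2
      = (List.range (b.length + 1)).map (fun k : Nat => pvCnt b (k : Int)) := by
  have h := pvPrefix_go b b [] rfl
  have h0 : ((PySem.List.count ([] : List Bool) true : Int),
      (List.range (([] : List Bool).length + 1)).map (fun k : Nat => pvCnt b (k : Int))) = ((0 : Int), [0]) := by
    simp [pvCnt, PySem.List.count]
  rw [h0] at h
  rw [h]

-- reading B's prefix array at an in-range index i yields the field id pvCnt b i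
lemma pvPrefix_get (b : List Bool) (i : Int) (h0 : 0 ≤ i) (h1 : i < (b.length : Int) + 1) :
    PySem.List.pyGetD ((List.range (b.length + 1)).map (fun k : Nat => pvCnt b (k : Int))) i 0 = pvCnt b i := by
  obtain ⟨k, rfl⟩ : ∃ k : Nat, i = (k : Int) := ⟨i.toNat, (Int.toNat_of_nonneg h0).symm⟩
  have hk : k < b.length + 1 := by exact_mod_cast h1
  rw [PySem.List.pyGetD_natCast]
  simp [List.getD_eq_getElem?_getD, List.getElem?_map, List.getElem?_range hk]

-- the two programs visit the same ascending list of in-range present keys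
lemma pvSameKeys (b : List Bool) (os : List (Int × List Int)) :
    (PySem.List.pyRange 0 ((b.length : Int) + 1) 1).filter
        (fun i => decide ((PySem.Dict.mk os).contains i = true))
      = (PySem.List.sorted (PySem.Set.ofList (os.map Prod.fst)) (fun x => x) false).filter
          (fun i => decide (0 ≤ i ∧ i < (b.length : Int) + 1)) := by
  set n : Int := (b.length : Int)
  set L := (PySem.List.pyRange 0 (n + 1) 1).filter
      (fun i => decide ((PySem.Dict.mk os).contains i = true)) with hL
  set R := (PySem.List.sorted (PySem.Set.ofList (os.map Prod.fst)) (fun x => x) false).filter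
      (fun i => decide (0 ≤ i ∧ i < n + 1)) with hR
  have hmem : ∀ x : Int, x ∈ L ↔ x ∈ R := by
    intro x
    have hc : (PySem.Dict.mk os).contains x = true ↔ x ∈ os.map Prod.fst := by
      rw [PySem.Dict.contains_eq_decide_mem_keys]
      simp [PySem.Dict.keys_mk]
    simp only [hL, hR, List.mem_filter, PySem.List.mem_pyRange_one,
      PySem.List.mem_sorted, PySem.Set.mem_ofList, decide_eq_true_eq]
    constructor
    · rintro ⟨⟨h0, h1⟩, h2⟩; exact ⟨hc.mp h2, h0, by omega⟩
    · rintro ⟨h2, h0, h1⟩; exact ⟨⟨h0, by omega⟩, hc.mpr h2⟩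
  have hLlt : L.Pairwise (· < ·) := (PySem.List.pairwise_lt_pyRange_one 0 (n + 1)).filter _
  have hRlt : R.Pairwise (· < ·) := (PySem.List.sorted_ofList_pairwise_lt _).filter _
  have hLnd : L.Nodup := hLlt.imp (fun h => ne_of_lt h)
  have hRnd : R.Nodup := hRlt.imp (fun h => ne_of_lt h)
  have hperm : L.Perm R := (List.perm_ext_iff_of_nodup hLnd hRnd).mpr hmem
  exact hperm.eq_of_pairwise (fun a b _ _ h1 h2 => absurd h2 (not_lt.mpr h1.le)) hLlt hRlt

-- ===== VERDICT (by name: the statement is the Claim_ definition above) =====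
theorem merge_trace_spec : Claim_equal_merge_trace := by
  intro b os _
  unfold Spec_merge_trace merge_trace merge_trace_alt
  simp only []
  rw [pvPrefix b]
  have hA := pvA_fold b os ((b.length : Int) + 1 - 0).toNat 0 PySem.Dict.empty le_rfl rfl
  have h0 : pvCnt b 0 = 0 := by simp [pvCnt]
  rw [h0] at hA
  rw [hA]
  rw [pvFoldl_guard_filter (fun i => (PySem.Dict.mk os).contains i = true)
        (fun tr i => pvMerge (PySem.Dict.mk os) tr (pvCnt b i) i)]
  rw [pvFoldl_guard_filter
        (fun i => 0 ≤ i ∧ i < (((List.range (b.length + 1)).map (fun k : Nat => pvCnt b (k : Int))).length : Int))]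
  have hlen : (((List.range (b.length + 1)).map (fun k : Nat => pvCnt b (k : Int))).length : Int)
      = (b.length : Int) + 1 := by simp
  rw [show (fun i => decide (0 ≤ i ∧ i < (((List.range (b.length + 1)).map
          (fun k : Nat => pvCnt b (k : Int))).length : Int)))
      = (fun i => decide (0 ≤ i ∧ i < (b.length : Int) + 1)) from funext fun i => by rw [hlen]]
  rw [← pvSameKeys b os]
  congr 1
  apply PySem.List.foldl_congr_mem
  intro tr i hi
  have hm := List.mem_filter.mp hi
  have h0i : 0 ≤ i := (PySem.List.mem_pyRange_one.mp hm.1).1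
  have h1i : i < (b.length : Int) + 1 := (PySem.List.mem_pyRange_one.mp hm.1).2
  rw [pvPrefix_get b i h0i h1i]
  rfl
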